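-- pv_equiv track=rewrite | github.com/stellurion/acm | qualifiers 2022/grader.py | clump
-- ===== SOURCE A (Python) =====
-- def clump(line: list):
--     clumps = []
--     i = 0 #position in list
--     while i < len(line):
--         start = i
--
--         while i + 1 < len(line) and line[i]+1 == line[i+1]: #create clump
--             i += 1
--         else:
--             end = i
--
--         clumps.append((start, end))
--         i += 1
--
--     return clumps
-- ===== SOURCE B (Python) =====
-- def clump(line: list):
--     if not line:
--         return []
--     breaks = [i for i in range(len(line) - 1) if line[i] + 1 != line[i + 1]]
--     pairs = []
--     start = 0
--     for b in breaks:
--         pairs.append((start, b))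
--         start = b + 1
--     pairs.append((start, len(line) - 1))
--     return pairs
-- ===== Notes on version B (the rewrite author's own statement) =====
-- stated objective: alternative
-- what changed: Replaces A's nested while-loop scan-and-advance with two flat passes: first collect all break indices where line[i]+1 != line[i+1] in a list comprehension, then convert that boundary table into (start,end) pairs in a single emit loop.
import Mathlib
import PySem

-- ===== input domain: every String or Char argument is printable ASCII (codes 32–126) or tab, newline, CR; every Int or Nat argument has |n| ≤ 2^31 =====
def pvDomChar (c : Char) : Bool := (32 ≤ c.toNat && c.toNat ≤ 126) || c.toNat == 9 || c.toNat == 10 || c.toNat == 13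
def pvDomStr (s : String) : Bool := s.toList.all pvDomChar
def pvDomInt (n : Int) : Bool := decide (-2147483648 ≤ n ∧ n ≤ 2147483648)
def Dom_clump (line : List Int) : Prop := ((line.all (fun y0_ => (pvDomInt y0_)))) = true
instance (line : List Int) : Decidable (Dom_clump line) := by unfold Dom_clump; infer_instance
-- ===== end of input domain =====

-- B replaces A's nested scan-and-advance loop by a break-index table plus an emit pass (alternative decomposition, same cost).


-- ===== PORT A =====
-- inner while: advance i while i+1 < len(line) and line[i]+1 == line[i+1]
-- (all indices accessed are in range, so List.getD is exact for Python's line[i])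
def clumpInner (line : List Int) (i : Nat) : Nat :=
  if _h : i + 1 < line.length ∧ line.getD i 0 + 1 = line.getD (i+1) 0 then
    clumpInner line (i+1)
  else i
termination_by line.length - i
decreasing_by omega

theorem clumpInner_ge (line : List Int) (i : Nat) : i ≤ clumpInner line i := by
  fun_induction clumpInner line i with
  | case1 i h ih => omega
  | case2 i h => omega

-- outer while over i, accumulating clumps
def clumpOuter (line : List Int) (clumps : List (Int × Int)) (i : Nat) : List (Int × Int) :=
  if _h : i < line.length then
    let start := i
    let e := clumpInner line i
    clumpOuter line (clumps ++ [((start : Int), (e : Int))]) (e + 1)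
  else clumps
termination_by line.length - i
decreasing_by have := clumpInner_ge line i; omega

def clump (line : List Int) : List (Int × Int) :=
  clumpOuter line [] 0

-- ===== PORT B =====
def clump_alt (line : List Int) : List (Int × Int) :=
  if line = [] then []
  else
    let breaks := (List.range (line.length - 1)).filter
      (fun i => line.getD i 0 + 1 ≠ line.getD (i+1) 0)
    let acc := breaks.foldl
      (fun (acc : List (Int × Int) × Nat) (b : Nat) => (acc.1 ++ [((acc.2 : Int), (b : Int))], b + 1))
      ([], 0)
    acc.1 ++ [((acc.2 : Int), ((line.length - 1 : Nat) : Int))]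

-- ===== PRECONDITION & SPEC =====
def Spec_clump (line : List Int) (out : List (Int × Int)) : Prop := out = clump_alt line
instance (line : List Int) (out : List (Int × Int)) : Decidable (Spec_clump line out) := by unfold Spec_clump; infer_instance

-- ===== CLAIM (what is proved, stated in full; the proofs are below) =====
def Claim_equal_clump : Prop := ∀ (line : List Int), Dom_clump line → Spec_clump line (clump line)

-- ===== LEMMAS AND PROOFS =====

-- emit pass of B, written recursively (related to B's foldl below)
def emitFrom (n start : Nat) : List Nat → List (Int × Int)
  | [] => [((start : Int), ((n - 1 : Nat) : Int))]
  | b :: bs => ((start : Int), (b : Int)) :: emitFrom n (b+1) bs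

theorem foldl_emit (n : Nat) (bs : List Nat) (pairs : List (Int × Int)) (start : Nat) :
    (bs.foldl (fun (acc : List (Int × Int) × Nat) (b : Nat) => (acc.1 ++ [((acc.2 : Int), (b : Int))], b + 1)) (pairs, start)).1
      ++ [(((bs.foldl (fun (acc : List (Int × Int) × Nat) (b : Nat) => (acc.1 ++ [((acc.2 : Int), (b : Int))], b + 1)) (pairs, start)).2 : Int), ((n - 1 : Nat) : Int))]
    = pairs ++ emitFrom n start bs := by
  induction bs generalizing pairs start with
  | nil => simp [emitFrom]
  | cons b bs ih => simp [List.foldl, emitFrom, ih]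

-- the suffix of B's break table starting at index i
def breaksFrom (line : List Int) (i : Nat) : List Nat :=
  (List.range' i (line.length - 1 - i)).filter
    (fun j => line.getD j 0 + 1 ≠ line.getD (j+1) 0)

theorem clumpInner_char (line : List Int) (i : Nat) :
    (∀ j, i ≤ j → j < clumpInner line i → line.getD j 0 + 1 = line.getD (j+1) 0) ∧
    (clumpInner line i + 1 < line.length → line.getD (clumpInner line i) 0 + 1 ≠ line.getD (clumpInner line i + 1) 0) ∧
    (i < line.length → clumpInner line i < line.length) := by
  fun_induction clumpInner line i with
  | case1 i h ih =>
    have hge := clumpInner_ge line (i+1)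
    refine ⟨?_, ih.2.1, fun _ => ih.2.2 (by omega)⟩
    intro j hj hj'
    rcases Nat.eq_or_lt_of_le hj with rfl | hlt
    · exact h.2
    · exact ih.1 j hlt hj'
  | case2 i h =>
    refine ⟨fun j hj hj' => by omega, ?_, fun hi => ?_⟩
    · intro hlt
      rcases not_and_or.mp h with h1 | h2
      · omega
      · exact h2
    · by_cases hlt : i + 1 < line.length
      · rcases not_and_or.mp h with h1 | h2
        · omega
        · omega
      · omega

theorem range'_split (i e m : Nat) (h : i ≤ e) (h2 : e ≤ m) :
    List.range' i (m - i) = List.range' i (e - i) ++ List.range' e (m - e) := by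
  obtain ⟨d, rfl⟩ : ∃ d, e = i + d := ⟨e - i, by omega⟩
  obtain ⟨k, rfl⟩ : ∃ k, m = i + d + k := ⟨m - (i + d), by omega⟩
  have h1 : i + d + k - i = d + k := by omega
  have h2 : i + d - i = d := by omega
  have h3 : i + d + k - (i + d) = k := by omega
  rw [h1, h2, h3, List.range'_append_1]

theorem breaksFrom_step (line : List Int) (i : Nat) (hi : i < line.length) :
    breaksFrom line i =
      if clumpInner line i + 1 < line.length
      then clumpInner line i :: breaksFrom line (clumpInner line i + 1)
      else [] := by
  obtain ⟨hno, hbrk, hlt⟩ := clumpInner_char line i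
  have hge := clumpInner_ge line i
  have he := hlt hi
  set e := clumpInner line i with hedef
  by_cases hcase : e + 1 < line.length
  · simp only [if_pos hcase]
    unfold breaksFrom
    have hsplit : List.range' i (line.length - 1 - i) =
        List.range' i (e - i) ++ e :: List.range' (e+1) (line.length - 1 - (e+1)) := by
      rw [range'_split i e (line.length - 1) (by omega) (by omega)]
      congr 1
      have h1 : line.length - 1 - e = (line.length - 1 - (e+1)) + 1 := by omega
      rw [h1, List.range'_succ]
    rw [hsplit, List.filter_append, List.filter_cons]
    have hfe : (decide (line.getD e 0 + 1 ≠ line.getD (e+1) 0)) = true := by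
      simpa [List.getD] using hbrk hcase
    rw [if_pos hfe]
    have hnil : (List.range' i (e - i)).filter (fun j => line.getD j 0 + 1 ≠ line.getD (j+1) 0) = [] := by
      apply List.filter_eq_nil_iff.mpr
      intro j hj
      simp only [List.mem_range'] at hj
      simpa [List.getD] using hno j (by omega) (by omega)
    rw [hnil, List.nil_append]
  · simp only [if_neg hcase]
    unfold breaksFrom
    apply List.filter_eq_nil_iff.mpr
    intro j hj
    simp only [List.mem_range'] at hj
    simpa [List.getD] using hno j (by omega) (by omega)

theorem clumpOuter_emit (line : List Int) (k : Nat) :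
    ∀ i acc, i < line.length → line.length - i ≤ k →
      clumpOuter line acc i = acc ++ emitFrom line.length i (breaksFrom line i) := by
  induction k with
  | zero => intro i acc h1 h2; omega
  | succ k ih =>
    intro i acc hi hk
    rw [clumpOuter, dif_pos hi]
    obtain ⟨hno, hbrk, hlt⟩ := clumpInner_char line i
    have hge := clumpInner_ge line i
    have he := hlt hi
    rw [breaksFrom_step line i hi]
    set e := clumpInner line i with hedef
    by_cases hcase : e + 1 < line.length
    · rw [if_pos hcase]
      rw [ih (e+1) _ hcase (by omega)]
      simp [emitFrom]
    · rw [if_neg hcase]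
      rw [clumpOuter, dif_neg (by omega)]
      have : line.length - 1 = e := by omega
      simp [emitFrom, this]

theorem clump_eq (line : List Int) : clump line = clump_alt line := by
  unfold clump clump_alt
  by_cases hnil : line = []
  · subst hnil
    rw [clumpOuter, dif_neg (by simp)]
    simp
  · rw [if_neg hnil]
    have hlen : 0 < line.length := List.length_pos_iff.mpr hnil
    rw [clumpOuter_emit line line.length 0 [] hlen (by omega)]
    have hb : (List.range (line.length - 1)).filter
        (fun i => line.getD i 0 + 1 ≠ line.getD (i+1) 0) = breaksFrom line 0 := by
      unfold breaksFrom
      rw [List.range_eq_range', Nat.sub_zero]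
    simp only [List.nil_append]
    rw [hb, foldl_emit line.length (breaksFrom line 0) [] 0, List.nil_append]

-- ===== VERDICT (by name: the statement is the Claim_ definition above) =====
theorem clump_spec : Claim_equal_clump := by
  intro line _
  unfold Spec_clump
  exact clump_eq line
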